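-- pv_equiv track=rewrite | github.com/ranjanib7/HML_Project | scalesim/compute/coordinate_compute.py | csr_to_dense_coordinates
-- ===== SOURCE A (Python) =====
-- def csr_to_dense_coordinates(indptr, indices):
--     #data, indptr, indices = compress_sparse_matrix(matrix)
--     coordinates = []
--     row_index = 0
--     for i in range(len(indptr) - 1):
--         for j in range(indptr[i], indptr[i + 1]):
--             col_index = indices[j]
--             coordinates.append((row_index, col_index))
--         row_index += 1
--     return coordinates
-- ===== SOURCE B (Python) =====
-- def csr_to_dense_coordinates(indptr, indices):
--     # CSR -> COO by run-length expansion: build the row-label table and the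
--     # flat column-position list, then pair them in one flat pass.
--     spans = list(zip(indptr, indptr[1:]))
--     row_labels = []
--     for i, (a, b) in enumerate(spans):
--         row_labels += [i] * (b - a)
--     positions = [j for a, b in spans for j in range(a, b)]
--     return [(r, indices[j]) for r, j in zip(row_labels, positions)]
-- ===== Notes on version B (the rewrite author's own statement) =====
-- stated objective: alternative
-- what changed: Replaces A's nested row loop with per-element appends by the standard CSR-to-COO decomposition: run-length-expand row labels from consecutive indptr differences, build the flat column-position list, and pair the two tables in one flat zip pass.
import Mathlib
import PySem

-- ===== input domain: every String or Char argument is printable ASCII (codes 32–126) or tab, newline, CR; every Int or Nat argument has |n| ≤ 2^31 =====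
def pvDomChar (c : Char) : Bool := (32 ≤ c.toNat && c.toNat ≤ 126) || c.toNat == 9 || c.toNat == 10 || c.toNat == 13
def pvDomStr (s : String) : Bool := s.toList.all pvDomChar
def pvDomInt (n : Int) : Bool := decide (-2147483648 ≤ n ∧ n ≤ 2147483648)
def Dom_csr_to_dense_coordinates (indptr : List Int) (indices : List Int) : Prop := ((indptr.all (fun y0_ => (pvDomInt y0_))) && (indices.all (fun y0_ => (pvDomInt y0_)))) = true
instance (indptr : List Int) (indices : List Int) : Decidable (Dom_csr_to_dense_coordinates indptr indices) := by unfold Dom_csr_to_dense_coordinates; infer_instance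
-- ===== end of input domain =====

-- B replaces A's nested append loop by the standard CSR→COO decomposition:
-- run-length-expand the row labels, list the flat column positions, then pair
-- the two tables in one flat pass (objective: alternative decomposition).

-- ===== PORT A =====
def csr_to_dense_coordinates (indptr : List Int) (indices : List Int) : List (Int × Int) :=
  ((List.range (indptr.length - 1)).foldl
    (fun (st : List (Int × Int) × Int) (i : Nat) =>
      ((PySem.List.pyRange (PySem.List.pyGetD indptr (i : Int) 0)
          (PySem.List.pyGetD indptr ((i : Int) + 1) 0) 1).foldl
        (fun acc j => acc ++ [(st.2, PySem.List.pyGetD indices j 0)]) st.1,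
       st.2 + 1))
    ([], 0)).1

-- ===== PORT B =====
def csr_to_dense_coordinates_alt (indptr : List Int) (indices : List Int) : List (Int × Int) :=
  (((PySem.List.enumerate (indptr.zip (indptr.drop 1))).foldl
      (fun acc p => acc ++ PySem.List.pyRepeat [p.1] (p.2.2 - p.2.1)) []).zip
    ((indptr.zip (indptr.drop 1)).flatMap (fun p => PySem.List.pyRange p.1 p.2 1))).map
    (fun rj => (rj.1, PySem.List.pyGetD indices rj.2 0))

-- ===== PRECONDITION & SPEC =====
-- Pre_ excludes exactly the inputs where the Python A raises IndexError
-- (some visited position j in range(indptr[k], indptr[k+1]) lies outside [-len(indices), len(indices))).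
def Pre_csr_to_dense_coordinates (indptr : List Int) (indices : List Int) : Prop :=
  ∀ k ∈ List.range (indptr.length - 1),
    indptr.getD k 0 < indptr.getD (k + 1) 0 →
      -(indices.length : Int) ≤ indptr.getD k 0 ∧ indptr.getD (k + 1) 0 ≤ (indices.length : Int)
instance (indptr : List Int) (indices : List Int) : Decidable (Pre_csr_to_dense_coordinates indptr indices) := by unfold Pre_csr_to_dense_coordinates; infer_instance

def pvWitness_csr_to_dense_coordinates : List Int × List Int := ([0, 2, 2, 3], [1, 0, 2])

def Spec_csr_to_dense_coordinates (indptr : List Int) (indices : List Int) (out : List (Int × Int)) : Prop := out = csr_to_dense_coordinates_alt indptr indices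
instance (indptr : List Int) (indices : List Int) (out : List (Int × Int)) : Decidable (Spec_csr_to_dense_coordinates indptr indices out) := by unfold Spec_csr_to_dense_coordinates; infer_instance

-- ===== CLAIM (what is proved, stated in full; the proofs are below) =====
def Claim_equal_csr_to_dense_coordinates : Prop := ∀ (indptr : List Int) (indices : List Int), Dom_csr_to_dense_coordinates indptr indices → Pre_csr_to_dense_coordinates indptr indices → Spec_csr_to_dense_coordinates indptr indices (csr_to_dense_coordinates indptr indices)

-- ===== LEMMAS AND PROOFS =====

-- the common normal form: one block of coordinates per row index i
def pvBlock (indptr indices : List Int) (i : Nat) : List (Int × Int) :=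
  (PySem.List.pyRange (PySem.List.pyGetD indptr (i : Int) 0)
      (PySem.List.pyGetD indptr ((i : Int) + 1) 0) 1).map
    (fun j => ((i : Int), PySem.List.pyGetD indices j 0))

theorem pvA_foldl (indptr indices : List Int) (k : Nat) :
    ((List.range k).foldl
      (fun (st : List (Int × Int) × Int) (i : Nat) =>
        ((PySem.List.pyRange (PySem.List.pyGetD indptr (i : Int) 0)
            (PySem.List.pyGetD indptr ((i : Int) + 1) 0) 1).foldl
          (fun acc j => acc ++ [(st.2, PySem.List.pyGetD indices j 0)]) st.1,
         st.2 + 1))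
      ([], 0))
    = ((List.range k).flatMap (pvBlock indptr indices), (k : Int)) := by
  induction k with
  | zero => simp
  | succ k ih =>
      rw [List.range_succ, List.foldl_append, ih, List.foldl_cons, List.foldl_nil,
          PySem.List.foldl_append_singleton_eq_map, List.flatMap_append]
      simp [pvBlock]

theorem pvA_eq (indptr indices : List Int) :
    csr_to_dense_coordinates indptr indices
      = (List.range (indptr.length - 1)).flatMap (pvBlock indptr indices) := by
  unfold csr_to_dense_coordinates
  rw [pvA_foldl]

theorem pvZip_flatMap {α β γ : Type} (f : α → List β) (g : α → List γ)
    (h : ∀ a, (f a).length = (g a).length) (l : List α) :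
    (l.flatMap f).zip (l.flatMap g) = l.flatMap (fun a => (f a).zip (g a)) := by
  induction l with
  | nil => simp
  | cons a l ih => simp [List.flatMap_cons, List.zip_append (h a), ih]

theorem pvZip_replicate_map {β : Type} (r : Int) (h : Int → β) (ys : List Int) :
    ((List.replicate ys.length r).zip ys).map (fun rj => (rj.1, h rj.2))
      = ys.map (fun j => (r, h j)) := by
  induction ys with
  | nil => simp
  | cons y ys ih => simpa [List.replicate_succ] using ih

theorem pvB_eq (indptr indices : List Int) :
    csr_to_dense_coordinates_alt indptr indices
      = (List.range (indptr.length - 1)).flatMap (pvBlock indptr indices) := by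
  unfold csr_to_dense_coordinates_alt
  have hspanlen : (indptr.zip (indptr.drop 1)).length = indptr.length - 1 := by
    simp [List.length_zip]
  rw [PySem.List.foldl_append_eq_flatMap, List.nil_append]
  have hpos : (indptr.zip (indptr.drop 1)).flatMap (fun p => PySem.List.pyRange p.1 p.2 1)
      = (PySem.List.enumerate (indptr.zip (indptr.drop 1))).flatMap
          (fun p => PySem.List.pyRange p.2.1 p.2.2 1) := by
    conv_lhs => rw [← PySem.List.map_snd_enumerate (indptr.zip (indptr.drop 1)) 0]
    rw [List.flatMap_map]
  rw [hpos, pvZip_flatMap _ _ (by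
        intro p
        simp [PySem.List.pyRepeat_singleton, PySem.List.length_pyRange_one]),
      List.map_flatMap]
  rw [PySem.List.enumerate_eq_map_pyRange (indptr.zip (indptr.drop 1)) ((0 : Int), (0 : Int)),
      List.flatMap_map]
  have hn : PySem.List.len (indptr.zip (indptr.drop 1)) = ((indptr.length - 1 : Nat) : Int) := by
    simp
  rw [hn, PySem.List.pyRange_zero_nat, List.flatMap_map]
  refine List.flatMap_congr ?_
  intro i hi
  rw [List.mem_range] at hi
  have hi' : i < (indptr.zip (indptr.drop 1)).length := by omega
  have hsp : PySem.List.pyGetD (indptr.zip (indptr.drop 1)) ((i : Nat) : Int) ((0 : Int), (0 : Int))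
      = (PySem.List.pyGetD indptr (i : Int) 0, PySem.List.pyGetD indptr ((i : Int) + 1) 0) := by
    have h1 : i < indptr.length := by omega
    have h2 : i + 1 < indptr.length := by
      simp [List.length_zip] at hi'; omega
    rw [PySem.List.pyGetD_natCast, List.getD_eq_getElem _ _ hi', List.getElem_zip]
    have e1 : ((i : Nat) : Int) = ((i : Nat) : Int) := rfl
    rw [PySem.List.pyGetD_natCast]
    have e2 : ((i : Int) + 1) = (((i + 1 : Nat)) : Int) := by push_cast; ring
    rw [e2, PySem.List.pyGetD_natCast]
    rw [List.getD_eq_getElem _ _ h1, List.getD_eq_getElem _ _ h2]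
    simp
  simp only [hsp, pvBlock, PySem.List.pyRepeat_singleton]
  rw [← PySem.List.length_pyRange_one (PySem.List.pyGetD indptr (i : Int) 0)
        (PySem.List.pyGetD indptr ((i : Int) + 1) 0)]
  exact pvZip_replicate_map (i : Int) (fun j => PySem.List.pyGetD indices j 0) _

-- ===== VERDICT (by name: the statement is the Claim_ definition above) =====
theorem csr_to_dense_coordinates_spec : Claim_equal_csr_to_dense_coordinates := by
  intro indptr indices _ _
  unfold Spec_csr_to_dense_coordinates
  rw [pvA_eq, pvB_eq]
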